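-- pv_equiv track=rewrite | github.com/TheEkinnox/AoC | 2024/09/day09.py | has_holes
-- ===== SOURCE A (Python) =====
-- def get_free_spot( data: list[ int ], offset = 0, limit = -1 ):
--     for i in range( offset, (limit if limit >= 0 else len( data )) ):
--         if data[ i ] < 0:
--             return i
--
--     return -1
--
-- def has_holes( data ):
--     free_spot = get_free_spot( data )
--
--     if free_spot == -1:
--         return False
--
--     for i in range( free_spot, len( data ) ):
--         if data[ i ] >= 0:
--             return True
--
--     return False
-- ===== SOURCE B (Python) =====
-- def has_holes( data ):
--     seen_free = False
--     for x in data: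
--         if x < 0:
--             seen_free = True
--         elif seen_free:
--             return True
--     return False
-- ===== Notes on version B (the rewrite author's own statement) =====
-- stated objective: simpler
-- what changed: Replaces the two-phase find-first-free-index-then-scan over index ranges with a single state-machine pass over the values using one seen_free flag, eliminating the get_free_spot helper.
import Mathlib
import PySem

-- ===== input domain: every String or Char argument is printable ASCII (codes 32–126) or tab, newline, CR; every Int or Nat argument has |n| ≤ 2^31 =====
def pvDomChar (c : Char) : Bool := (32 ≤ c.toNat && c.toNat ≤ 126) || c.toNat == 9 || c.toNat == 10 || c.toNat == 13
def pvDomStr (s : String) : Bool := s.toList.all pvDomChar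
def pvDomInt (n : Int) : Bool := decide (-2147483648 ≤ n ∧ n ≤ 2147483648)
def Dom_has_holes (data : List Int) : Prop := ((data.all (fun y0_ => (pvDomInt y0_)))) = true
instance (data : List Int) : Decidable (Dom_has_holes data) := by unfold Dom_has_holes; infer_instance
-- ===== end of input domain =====

-- B is a single one-flag pass over the values instead of A's find-first-free-index-then-scan over index ranges; return values proved equal on all inputs.

-- ===== PORT A =====
-- for i in range(offset, limit if limit >= 0 else len(data)): if data[i] < 0: return i / return -1
def get_free_spot (data : List Int) (offset : Int) (limit : Int) : Int :=
  match (PySem.List.pyRange offset (if limit ≥ 0 then limit else (data.length : Int)) 1).find?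
      (fun i => decide (PySem.List.pyGetD data i 0 < 0)) with
  | some i => i
  | none => -1

def has_holes (data : List Int) : Bool :=
  let free_spot := get_free_spot data 0 (-1)
  if free_spot == -1 then false
  else (PySem.List.pyRange free_spot (data.length : Int) 1).any
        (fun i => decide (0 ≤ PySem.List.pyGetD data i 0))

-- ===== PORT B =====
def has_holes_alt_go (data : List Int) (seen_free : Bool) : Bool :=
  match data with
  | [] => false
  | x :: xs =>
    if x < 0 then has_holes_alt_go xs true
    else if seen_free then true
    else has_holes_alt_go xs seen_free

def has_holes_alt (data : List Int) : Bool :=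
  has_holes_alt_go data false

-- ===== PRECONDITION & SPEC =====
def Spec_has_holes (data : List Int) (out : Bool) : Prop := out = has_holes_alt data
instance (data : List Int) (out : Bool) : Decidable (Spec_has_holes data out) := by unfold Spec_has_holes; infer_instance

-- ===== CLAIM (what is proved, stated in full; the proofs are below) =====
def Claim_equal_has_holes : Prop := ∀ (data : List Int), Dom_has_holes data → Spec_has_holes data (has_holes data)

-- ===== LEMMAS AND PROOFS =====

-- B's inner loop once the flag is set: any later non-negative value yields true
lemma go_true_eq_any (data : List Int) :
    has_holes_alt_go data true = data.any (fun x => decide (0 ≤ x)) := by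
  induction data with
  | nil => simp [has_holes_alt_go]
  | cons x xs ih =>
    simp only [has_holes_alt_go, List.any_cons]
    by_cases h : x < 0
    · simp [h, ih, show ¬ (0 ≤ x) by omega]
    · simp [h, show (0 ≤ x) by omega]

-- B equals the "dropWhile non-negative prefix, then any non-negative" formulation
lemma alt_eq_dropWhile (data : List Int) :
    has_holes_alt data
      = (data.dropWhile (fun x => !decide (x < 0))).any (fun x => decide (0 ≤ x)) := by
  unfold has_holes_alt
  induction data with
  | nil => simp [has_holes_alt_go]
  | cons x xs ih =>
    simp only [has_holes_alt_go, List.dropWhile_cons]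
    by_cases h : x < 0
    · simp [h, go_true_eq_any, show ¬ (0 ≤ x) by omega]
    · simp [h, ih]

-- first failing index characterizes dropWhile as drop
lemma dropWhile_eq_drop_of (p : Int → Bool) (data : List Int) (n : Nat) (hn : n < data.length)
    (hpre : ∀ k (h : k < n), p (data[k]'(by omega)) = true)
    (hcur : p (data[n]'hn) = false) :
    data.dropWhile p = data.drop n := by
  induction data generalizing n with
  | nil => simp at hn
  | cons x xs ih =>
    cases n with
    | zero =>
      simp only [List.getElem_cons_zero] at hcur
      simp [hcur]
    | succ m =>
      have hx : p x = true := hpre 0 (Nat.succ_pos m)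
      simp only [List.dropWhile_cons, hx, List.drop_succ_cons]
      exact ih m (by simpa using hn) (fun k hk => hpre (k+1) (by omega)) (by simpa using hcur)

theorem has_holes_spec' (data : List Int) : has_holes data = has_holes_alt data := by
  rw [alt_eq_dropWhile]
  unfold has_holes get_free_spot
  simp only [ge_iff_le, if_neg (by omega : ¬ ((0:Int) ≤ -1))]
  rcases hF : (PySem.List.pyRange 0 (data.length : Int) 1).find?
      (fun i => decide (PySem.List.pyGetD data i 0 < 0)) with _ | i
  · -- no free spot: every element is non-negative, both sides false
    simp only [beq_self_eq_true, if_pos]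
    have hall : ∀ x ∈ data, ¬ (x < 0) := by
      intro x hx
      obtain ⟨k, hk, hkx⟩ := List.getElem_of_mem hx
      have hmem : (k : Int) ∈ PySem.List.pyRange 0 (data.length : Int) 1 := by
        rw [PySem.List.mem_pyRange_one]; omega
      have := List.find?_eq_none.mp hF _ hmem
      simp only [PySem.List.pyGetD_natCast, decide_eq_true_eq] at this
      rw [List.getD_eq_getElem _ _ hk, hkx] at this
      exact this
    have : data.dropWhile (fun x => !decide (x < 0)) = [] := by
      rw [List.dropWhile_eq_nil_iff]
      intro x hx; simp [hall x hx]
    simp [this]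
  · -- free spot i: first negative index
    obtain ⟨hpi, as, bs, heq, hpre⟩ := List.find?_eq_some_iff_append.mp hF
    have hi_mem : i ∈ PySem.List.pyRange 0 (data.length : Int) 1 := by
      rw [heq]; exact List.mem_append_right _ (List.mem_cons_self)
    have hi_rng := (PySem.List.mem_pyRange_one).mp hi_mem
    have hi0 : 0 ≤ i := hi_rng.1
    have hilen : i < (data.length : Int) := hi_rng.2
    have hne : (i == (-1 : Int)) = false := by simp; omega
    rw [hne]
    simp only [Bool.false_eq_true, if_false]
    -- A's second loop = any over the dropped suffix
    have hany : (PySem.List.pyRange i (data.length : Int) 1).any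
          (fun j => decide (0 ≤ PySem.List.pyGetD data j 0))
        = (data.drop i.toNat).any (fun x => decide (0 ≤ x)) := by
      have hmap := PySem.List.map_pyGetD_pyRange' data (0:Int) hi0
      calc (PySem.List.pyRange i (data.length : Int) 1).any
              (fun j => decide (0 ≤ PySem.List.pyGetD data j 0))
          = ((PySem.List.pyRange i (data.length : Int) 1).map
              (fun j => PySem.List.pyGetD data j 0)).any (fun x => decide (0 ≤ x)) := by
            rw [List.any_map]; rfl
        _ = (data.drop i.toNat).any (fun x => decide (0 ≤ x)) := by rw [hmap]
    rw [hany]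
    -- dropWhile = drop i.toNat
    have hsorted : (PySem.List.pyRange 0 (data.length : Int) 1).Pairwise (· < ·) :=
      PySem.List.pairwise_lt_pyRange_one 0 _
    rw [heq] at hsorted
    have hbs : ∀ b ∈ bs, i < b := by
      have := (List.pairwise_append.mp hsorted).2.1
      intro b hb; exact (List.pairwise_cons.mp this).1 b hb
    have hmin : ∀ j : Int, 0 ≤ j → j < i → PySem.List.pyGetD data j 0 ≥ 0 := by
      intro j hj0 hji
      have hjmem : j ∈ PySem.List.pyRange 0 (data.length : Int) 1 := by
        rw [PySem.List.mem_pyRange_one]; omega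
      rw [heq] at hjmem
      rcases List.mem_append.mp hjmem with hja | hjb
      · have := hpre j hja
        simp only [Bool.not_eq_eq_eq_not, Bool.not_true, decide_eq_false_iff_not] at this
        omega
      · rcases List.mem_cons.mp hjb with h | h
        · omega
        · exact absurd (hbs j h) (by omega)
    have hdrop : data.dropWhile (fun x => !decide (x < 0)) = data.drop i.toNat := by
      apply dropWhile_eq_drop_of _ _ i.toNat (by omega)
      · intro k hk
        have := hmin (k : Int) (by omega) (by omega)
        rw [PySem.List.pyGetD_natCast, List.getD_eq_getElem _ _ (by omega)] at this
        simp; omega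
      · have : PySem.List.pyGetD data i 0 < 0 := by simpa using hpi
        rw [PySem.List.pyGetD_eq_getElem data 0 hi0 hilen] at this
        simp; omega
    rw [hdrop]

-- ===== VERDICT (by name: the statement is the Claim_ definition above) =====
theorem has_holes_spec : Claim_equal_has_holes := by
  intro data _
  exact has_holes_spec' data
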